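-- pv_equiv track=rewrite | github.com/Muzna-Adil-Almamari/The-Alphabet-Alchemist | Alphabet_Alchemist_func.py | convert_measurements
-- ===== SOURCE A (Python) =====
-- def char_to_value(ch: str) -> int:
--     """Convert a single character to its numeric value."""
--     if ch == "_":
--         return 0
--     return ord(ch) - ord("a") + 1
--
-- def parse_element(s: str, i: int) -> tuple[int, int]:
--     """
--     Parse one element starting at index i.
--     Handles rule that 'z' cannot stand alone.
--     Returns (value, new_index).
--     """
--     if s[i] == "z":
--         total = 0
--         while i < len(s) and s[i] == "z":
--             total += 26
--             i += 1
--         if i < len(s):  # attach the next non-z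
--             total += char_to_value(s[i])
--             i += 1
--         return total, i
--     else:
--         return char_to_value(s[i]), i + 1
--
-- def convert_measurements(s: str) -> list[int]:
--     """Main conversion function following all rules."""
--     if not s:
--         return []
--
--     # Rule 8: if input starts with "_", only append [0]
--     if s[0] == "_":
--         return [0]
--
--     output = []
--     i = 0
--     n = len(s)
--
--     while i < n:
--         # Parse count element
--         count, i = parse_element(s, i)
--
--         if count == 0:  # "_" as count
--             output.append(0)
--             continue
--
--         # Collect count elements
--         total = 0
--         for _ in range(count):
--             if i >= n:
--                 break
--             val, i = parse_element(s, i)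
--             total += val
--         output.append(total)
--
--     return output
-- ===== SOURCE B (Python) =====
-- def convert_measurements(s: str) -> list[int]:
--     # B: tokenize once into a flat value list, then a second pass over tokens.
--     if not s:
--         return []
--     if s[0] == "_":
--         return [0]
--     n = len(s)
--     tokens = []
--     i = 0
--     while i < n:
--         if s[i] == "z":
--             t = 0
--             while i < n and s[i] == "z":
--                 t += 26
--                 i += 1
--             if i < n:
--                 t += 0 if s[i] == "_" else ord(s[i]) - ord("a") + 1
--                 i += 1
--             tokens.append(t)
--         else:
--             tokens.append(0 if s[i] == "_" else ord(s[i]) - ord("a") + 1)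
--             i += 1
--     out = []
--     j = 0
--     m = len(tokens)
--     while j < m:
--         count = tokens[j]
--         j += 1
--         if count == 0:
--             out.append(0)
--             continue
--         total = 0
--         for _ in range(count):
--             if j >= m:
--                 break
--             total += tokens[j]
--             j += 1
--         out.append(total)
--     return out
-- ===== Notes on version B (the rewrite author's own statement) =====
-- stated objective: alternative
-- what changed: B separates the work into two phases: a single tokenizing pass converts the string into a flat list of element values, then a second pass over that token list reads each count and sums the following tokens, instead of A's interleaved re-parsing of the string inside the counting loop.
import Mathlib
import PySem

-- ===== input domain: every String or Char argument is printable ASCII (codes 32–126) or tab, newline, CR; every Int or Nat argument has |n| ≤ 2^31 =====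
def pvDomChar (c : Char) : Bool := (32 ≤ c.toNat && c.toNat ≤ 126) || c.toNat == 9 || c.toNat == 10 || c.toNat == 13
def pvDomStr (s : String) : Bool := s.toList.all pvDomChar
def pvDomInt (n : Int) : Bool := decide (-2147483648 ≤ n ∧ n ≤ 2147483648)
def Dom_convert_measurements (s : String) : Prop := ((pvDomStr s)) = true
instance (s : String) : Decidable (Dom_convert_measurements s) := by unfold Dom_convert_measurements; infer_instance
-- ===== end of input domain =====

-- B tokenizes the string once into a flat value list and then sums groups in a second
-- pass over that list; A re-parses the string inside its counting loop. Same results.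

-- ===== PORT A =====
-- char_to_value(ch)
def char_to_value (ch : Char) : Int :=
  if ch = '_' then 0 else (ch.toNat : Int) - ('a'.toNat : Int) + 1

-- the 'while i < len(s) and s[i] == "z"' loop of parse_element
theorem pvDecStep (a i : Nat) (h : i < a) : a - (i + 1) < a - i := by omega

def zrunA (cs : List Char) (i : Nat) (total : Int) : Int × Nat :=
  if h : i < cs.length ∧ cs.getD i ' ' = 'z' then zrunA cs (i + 1) (total + 26)
  else (total, i)
termination_by cs.length - i
decreasing_by exact pvDecStep cs.length i h.1

-- parse_element(s, i); only ever called with i < len(s), so getD's default is never read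
def parse_elementA (cs : List Char) (i : Nat) : Int × Nat :=
  if cs.getD i ' ' = 'z' then
    if (zrunA cs i 0).2 < cs.length then
      ((zrunA cs i 0).1 + char_to_value (cs.getD (zrunA cs i 0).2 ' '), (zrunA cs i 0).2 + 1)
    else zrunA cs i 0
  else (char_to_value (cs.getD i ' '), i + 1)

theorem zrunA_ge (cs : List Char) (i : Nat) (total : Int) : i ≤ (zrunA cs i total).2 := by
  fun_induction zrunA with
  | case1 i total h ih => omega
  | case2 i total h => simp

theorem parse_elementA_gt (cs : List Char) (i : Nat) (h : i < cs.length) :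
    i < (parse_elementA cs i).2 := by
  unfold parse_elementA
  split
  · next hc =>
    have hz : i < (zrunA cs i 0).2 := by
      rw [zrunA, dif_pos (And.intro h hc)]
      have := zrunA_ge cs (i + 1) (0 + 26)
      omega
    split
    · exact Nat.lt_succ_of_lt hz
    · exact hz
  · simp

-- the 'for _ in range(count)' loop of convert_measurements (k = count as a Nat)
def innerA (cs : List Char) (k : Nat) (i : Nat) (total : Int) : Int × Nat :=
  match k with
  | 0 => (total, i)
  | k + 1 =>
    if cs.length ≤ i then (total, i)
    else innerA cs k (parse_elementA cs i).2 (total + (parse_elementA cs i).1)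

theorem innerA_ge (cs : List Char) (k i : Nat) (total : Int) : i ≤ (innerA cs k i total).2 := by
  induction k generalizing i total with
  | zero => simp [innerA]
  | succ k ih =>
    unfold innerA
    split
    · simp
    · next h =>
      have h1 := parse_elementA_gt cs i (by omega)
      have h2 := ih (parse_elementA cs i).2 (total + (parse_elementA cs i).1)
      omega

theorem pvDecPast (a i j : Nat) (h : i < a) (h1 : i < j) : a - j < a - i := by omega

theorem pvDecPast2 (a i j k : Nat) (h : i < a) (h1 : i < j) (h2 : j ≤ k) : a - k < a - i := by
  omega

-- the outer 'while i < n' loop of convert_measurements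
def outerA (cs : List Char) (i : Nat) : List Int :=
  if h : i < cs.length then
    if (parse_elementA cs i).1 = 0 then 0 :: outerA cs (parse_elementA cs i).2
    else
      (innerA cs (parse_elementA cs i).1.toNat (parse_elementA cs i).2 0).1 ::
        outerA cs (innerA cs (parse_elementA cs i).1.toNat (parse_elementA cs i).2 0).2
  else []
termination_by cs.length - i
decreasing_by
  · exact pvDecPast cs.length i _ h (parse_elementA_gt cs i h)
  · exact pvDecPast2 cs.length i _ _ h (parse_elementA_gt cs i h)
      (innerA_ge cs (parse_elementA cs i).1.toNat (parse_elementA cs i).2 0)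

def convert_measurements (s : String) : List Int :=
  if s.toList.length = 0 then []
  else if s.toList.getD 0 ' ' = '_' then [0]
  else outerA s.toList 0

-- ===== PORT B =====
-- the tokenizing first pass of B ('while i < n' building tokens)
def tokenizeB (cs : List Char) (i : Nat) : List Int :=
  if h : i < cs.length then
    if cs.getD i ' ' = 'z' then
      -- same z-run loop as in Source B's tokenizer
      if h2 : (zrunA cs i 0).2 < cs.length then
        ((zrunA cs i 0).1 + char_to_value (cs.getD (zrunA cs i 0).2 ' ')) :: tokenizeB cs ((zrunA cs i 0).2 + 1)
      else [(zrunA cs i 0).1]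
    else char_to_value (cs.getD i ' ') :: tokenizeB cs (i + 1)
  else []
termination_by cs.length - i
decreasing_by
  · exact pvDecPast2 cs.length i _ _ h (Nat.lt_succ_of_le (zrunA_ge cs i 0)) (Nat.le_refl _)
  · exact pvDecStep cs.length i h

-- the inner 'for _ in range(count)' of B's second pass: sum up to k tokens, break on exhaustion
def takeSumB (k : Nat) (acc : Int) (ts : List Int) : Int × List Int :=
  match k with
  | 0 => (acc, ts)
  | k + 1 =>
    match ts with
    | [] => (acc, [])
    | t :: ts' => takeSumB k (acc + t) ts'

theorem takeSumB_len (k : Nat) (acc : Int) (ts : List Int) :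
    (takeSumB k acc ts).2.length ≤ ts.length := by
  induction k generalizing acc ts with
  | zero => simp [takeSumB]
  | succ k ih =>
    cases ts with
    | nil => simp [takeSumB]
    | cons t ts' => have := ih (acc + t) ts'; simp [takeSumB]; omega

-- B's second pass over the token list (index j advancing = consuming the list)
def pass2B (ts : List Int) : List Int :=
  match ts with
  | [] => []
  | c :: rest =>
    if c = 0 then 0 :: pass2B rest
    else (takeSumB c.toNat 0 rest).1 :: pass2B (takeSumB c.toNat 0 rest).2
termination_by ts.length
decreasing_by
  · exact Nat.lt_succ_self rest.length
  · exact Nat.lt_succ_of_le (takeSumB_len c.toNat 0 rest)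

def convert_measurements_alt (s : String) : List Int :=
  if s.toList.length = 0 then []
  else if s.toList.getD 0 ' ' = '_' then [0]
  else pass2B (tokenizeB s.toList 0)

-- ===== PRECONDITION & SPEC =====
def Spec_convert_measurements (s : String) (out : List Int) : Prop := out = convert_measurements_alt s
instance (s : String) (out : List Int) : Decidable (Spec_convert_measurements s out) := by unfold Spec_convert_measurements; infer_instance

-- ===== CLAIM (what is proved, stated in full; the proofs are below) =====
def Claim_equal_convert_measurements : Prop := ∀ (s : String), Dom_convert_measurements s → Spec_convert_measurements s (convert_measurements s)

-- ===== LEMMAS AND PROOFS =====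

theorem tokenizeB_nil (cs : List Char) (i : Nat) (h : ¬ i < cs.length) : tokenizeB cs i = [] := by
  rw [tokenizeB]; simp [h]

-- one step of the tokenizer produces exactly parse_elementA's value and continues at its index
theorem tokenizeB_cons (cs : List Char) (i : Nat) (h : i < cs.length) :
    tokenizeB cs i = (parse_elementA cs i).1 :: tokenizeB cs (parse_elementA cs i).2 := by
  rw [tokenizeB, parse_elementA]
  simp only [h, dite_true]
  split
  · split
    · rfl
    · next h2 => rw [tokenizeB_nil cs _ h2]
  · rfl

theorem inner_eq (cs : List Char) (k : Nat) (i : Nat) (total : Int) :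
    (innerA cs k i total).1 = (takeSumB k total (tokenizeB cs i)).1 ∧
    tokenizeB cs (innerA cs k i total).2 = (takeSumB k total (tokenizeB cs i)).2 := by
  induction k generalizing i total with
  | zero => simp [innerA, takeSumB]
  | succ k ih =>
    by_cases h : i < cs.length
    · rw [tokenizeB_cons cs i h]
      unfold innerA
      rw [if_neg (by omega)]
      exact ih _ _
    · rw [tokenizeB_nil cs i h]
      unfold innerA takeSumB
      rw [if_pos (by omega)]
      exact ⟨rfl, tokenizeB_nil cs i h⟩

theorem outer_eq (cs : List Char) (i : Nat) : outerA cs i = pass2B (tokenizeB cs i) := by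
  fun_induction outerA with
  | case1 i h hc ih =>
    rw [tokenizeB_cons cs i h, pass2B, if_pos hc, ih]
  | case2 i h hc ih =>
    rw [tokenizeB_cons cs i h, pass2B, if_neg hc]
    have he := inner_eq cs (parse_elementA cs i).1.toNat (parse_elementA cs i).2 0
    rw [ih, he.2, he.1]
  | case3 i h =>
    rw [tokenizeB_nil cs i h, pass2B]

-- ===== VERDICT (by name: the statement is the Claim_ definition above) =====

theorem convert_measurements_spec : Claim_equal_convert_measurements := by
  intro s _
  unfold Spec_convert_measurements convert_measurements convert_measurements_alt
  split
  · rfl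
  · split
    · rfl
    · exact outer_eq s.toList 0
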